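-- pv_equiv track=rewrite | github.com/the-hive-lab/autocross | autocross/calculate/costs.py | get_cost_domain_indices
-- ===== SOURCE A (Python) =====
-- def get_cost_domain_indices(costs):
--     lower_i = 0
--     upper_i = len(costs) - 1
--
--     for index, cost in enumerate(costs):
--         # if not cost:
--         if cost is not None:
--             lower_i = index
--             break
--
--     for index, cost in reversed(list(enumerate(costs))):
--         # if not cost:
--         if cost is not None:
--             upper_i = index
--             break
--
--     return lower_i, upper_i
-- ===== SOURCE B (Python) =====
-- def get_cost_domain_indices(costs):
--     lower_i = 0
--     upper_i = len(costs) - 1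
--     found_first = False
--     for index, cost in enumerate(costs):
--         if cost is not None:
--             if not found_first:
--                 lower_i = index
--                 found_first = True
--             upper_i = index
--     return lower_i, upper_i
-- ===== Notes on version B (the rewrite author's own statement) =====
-- stated objective: alternative
-- what changed: Replaces A's two directional early-break scans (forward for the first non-None, backward over reversed(list(enumerate(...))) for the last) with one forward pass that maintains both endpoints with a found-first flag.
import Mathlib
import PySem

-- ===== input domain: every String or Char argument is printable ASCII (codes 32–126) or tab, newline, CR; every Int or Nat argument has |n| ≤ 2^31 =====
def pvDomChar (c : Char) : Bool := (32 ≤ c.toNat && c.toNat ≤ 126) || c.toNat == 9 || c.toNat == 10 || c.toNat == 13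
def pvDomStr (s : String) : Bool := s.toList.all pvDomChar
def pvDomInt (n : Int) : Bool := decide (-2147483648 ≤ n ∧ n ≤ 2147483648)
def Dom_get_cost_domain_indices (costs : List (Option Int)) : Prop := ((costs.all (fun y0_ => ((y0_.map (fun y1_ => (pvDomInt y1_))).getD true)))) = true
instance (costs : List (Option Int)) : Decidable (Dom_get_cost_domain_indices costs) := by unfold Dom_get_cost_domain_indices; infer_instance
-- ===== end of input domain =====

-- B replaces A's two directional early-break scans with one forward pass keeping both endpoints (alternative decomposition, same cost).


-- ===== PORT A =====
-- helper: A's 'for index, cost in <pairs>: if cost is not None: <result> = index; break' falling back to d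
def pvFindA : List (Int × Option Int) → Int → Int
  | [], d => d
  | (i, c) :: rest, d => if c.isSome then i else pvFindA rest d

def get_cost_domain_indices (costs : List (Option Int)) : Int × Int :=
  let lower_i : Int := 0
  let upper_i : Int := (costs.length : Int) - 1
  let lower_i := pvFindA (PySem.List.enumerate costs) lower_i
  let upper_i := pvFindA (PySem.List.enumerate costs).reverse upper_i
  (lower_i, upper_i)

-- ===== PORT B =====
-- state = (lower_i, upper_i, found_first)
def pvStepB (st : Int × Int × Bool) (p : Int × Option Int) : Int × Int × Bool :=
  match p.2 with
  | some _ => (if st.2.2 then st.1 else p.1, p.1, true)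
  | none => st

def get_cost_domain_indices_alt (costs : List (Option Int)) : Int × Int :=
  let st := (PySem.List.enumerate costs).foldl pvStepB (0, (costs.length : Int) - 1, false)
  (st.1, st.2.1)

-- ===== PRECONDITION & SPEC =====
def Spec_get_cost_domain_indices (costs : List (Option Int)) (out : Int × Int) : Prop := out = get_cost_domain_indices_alt costs
instance (costs : List (Option Int)) (out : Int × Int) : Decidable (Spec_get_cost_domain_indices costs out) := by unfold Spec_get_cost_domain_indices; infer_instance

-- ===== CLAIM (what is proved, stated in full; the proofs are below) =====
def Claim_equal_get_cost_domain_indices : Prop := ∀ (costs : List (Option Int)), Dom_get_cost_domain_indices costs → Spec_get_cost_domain_indices costs (get_cost_domain_indices costs)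

-- ===== LEMMAS AND PROOFS =====
-- index (from 0) of the first non-None element, if any
def pvFirstSome : List (Option Int) → Option Nat
  | [] => none
  | some _ :: _ => some 0
  | none :: rest => (pvFirstSome rest).map (· + 1)

-- index (from 0) of the last non-None element, if any
def pvLastSome : List (Option Int) → Option Nat
  | [] => none
  | c :: rest =>
    match pvLastSome rest with
    | some i => some (i + 1)
    | none => if c.isSome then some 0 else none

theorem pvFirstSome_none_iff (xs : List (Option Int)) :
    pvFirstSome xs = none ↔ pvLastSome xs = none := by
  induction xs with
  | nil => simp [pvFirstSome, pvLastSome]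
  | cons c rest ih =>
    cases c with
    | none =>
      cases hf : pvFirstSome rest with
      | none => simp [pvFirstSome, pvLastSome, hf, ih.mp hf]
      | some j =>
        have hl : pvLastSome rest ≠ none := fun h => by simp [ih.mpr h] at hf
        cases hl2 : pvLastSome rest with
        | none => exact absurd hl2 hl
        | some i => simp [pvFirstSome, pvLastSome, hf, hl2]
    | some v => simp [pvFirstSome, pvLastSome]; cases pvLastSome rest <;> simp

theorem pvFindA_enum (xs : List (Option Int)) (s d : Int) :
    pvFindA (PySem.List.enumerate xs s) d =
      (match pvFirstSome xs with
       | some i => s + (i : Int)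
       | none => d) := by
  induction xs generalizing s with
  | nil => simp [PySem.List.enumerate_nil, pvFindA, pvFirstSome]
  | cons c rest ih =>
    rw [PySem.List.enumerate_cons]
    cases c with
    | none =>
      simp only [pvFindA, Option.isSome_none, Bool.false_eq_true, if_false, ih, pvFirstSome]
      cases pvFirstSome rest with
      | none => simp
      | some i => simp; ring
    | some v => simp [pvFindA, pvFirstSome]

theorem pvFindA_append (l1 l2 : List (Int × Option Int)) (d : Int) :
    pvFindA (l1 ++ l2) d = pvFindA l1 (pvFindA l2 d) := by
  induction l1 with
  | nil => simp [pvFindA]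
  | cons p rest ih =>
    obtain ⟨i, c⟩ := p
    simp only [List.cons_append, pvFindA, ih]

theorem pvFindA_enum_rev (xs : List (Option Int)) (s d : Int) :
    pvFindA (PySem.List.enumerate xs s).reverse d =
      (match pvLastSome xs with
       | some i => s + (i : Int)
       | none => d) := by
  induction xs generalizing s d with
  | nil => simp [PySem.List.enumerate_nil, pvFindA, pvLastSome]
  | cons c rest ih =>
    rw [PySem.List.enumerate_cons]
    simp only [List.reverse_cons, pvFindA_append, ih]
    cases hl : pvLastSome rest with
    | some i => simp [pvLastSome, hl]; ring
    | none =>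
      cases c with
      | none => simp [pvLastSome, hl, pvFindA]
      | some v => simp [pvLastSome, hl, pvFindA]

theorem pvFoldB_enum (xs : List (Option Int)) (s : Int) (st : Int × Int × Bool) :
    (PySem.List.enumerate xs s).foldl pvStepB st =
      (match pvFirstSome xs, pvLastSome xs with
       | some f, some l => ((if st.2.2 then st.1 else s + (f : Int)), s + (l : Int), true)
       | _, _ => st) := by
  induction xs generalizing s st with
  | nil => simp [PySem.List.enumerate_nil, pvFirstSome, pvLastSome]
  | cons c rest ih =>
    rw [PySem.List.enumerate_cons]
    cases c with
    | none =>
      simp only [List.foldl_cons, pvStepB, ih]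
      cases hf : pvFirstSome rest with
      | none =>
        simp [pvFirstSome, pvLastSome, hf, (pvFirstSome_none_iff rest).mp hf]
      | some f =>
        cases hl : pvLastSome rest with
        | none => exact absurd ((pvFirstSome_none_iff rest).mpr hl) (by simp [hf])
        | some l =>
          simp only [pvFirstSome, pvLastSome, hf, hl, Option.map_some]
          refine Prod.ext ?_ (Prod.ext ?_ rfl)
          · show (if st.2.2 then st.1 else s + 1 + (f : Int)) = if st.2.2 then st.1 else s + ((f : Int) + 1)
            split
            · rfl
            · ring
          · show s + 1 + (l : Int) = s + ((l : Int) + 1)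
            ring
    | some v =>
      simp only [List.foldl_cons, pvStepB, ih, pvFirstSome, pvLastSome]
      cases hf : pvFirstSome rest with
      | none =>
        simp [(pvFirstSome_none_iff rest).mp hf]
      | some f =>
        cases hl : pvLastSome rest with
        | none => exact absurd ((pvFirstSome_none_iff rest).mpr hl) (by simp [hf])
        | some l =>
          have h1 : s + 1 + (l : Int) = s + ((l : Int) + 1) := by ring
          simp [h1]

-- ===== VERDICT (by name: the statement is the Claim_ definition above) =====
theorem get_cost_domain_indices_spec : Claim_equal_get_cost_domain_indices := by
  intro costs _
  unfold Spec_get_cost_domain_indices get_cost_domain_indices get_cost_domain_indices_alt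
  simp only [pvFindA_enum, pvFindA_enum_rev, pvFoldB_enum]
  cases hf : pvFirstSome costs with
  | none => simp [(pvFirstSome_none_iff costs).mp hf]
  | some f =>
    cases hl : pvLastSome costs with
    | none => exact absurd ((pvFirstSome_none_iff costs).mpr hl) (by simp [hf])
    | some l => simp
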